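-- pv_equiv track=rewrite | github.com/CutieillFusion/swag | ddp_dataloader.py | _has_consecutive
-- ===== SOURCE A (Python) =====
-- def _has_consecutive(seq, label_val, threshold):
--     count = 0
--     for label in seq:
--         if label == label_val:
--             count += 1
--             if count >= threshold:
--                 return True
--         else:
--             count = 0
--     return False
-- ===== SOURCE B (Python) =====
-- def _has_consecutive(seq, label_val, threshold):
--     # Scan maximal runs of equal consecutive values with two indices,
--     # testing each run's label and length, instead of a per-element counter.
--     i, n = 0, len(seq)
--     while i < n:
--         j = i
--         while j < n and seq[j] == seq[i]:
--             j += 1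
--         if seq[i] == label_val and j - i >= threshold:
--             return True
--         i = j
--     return False
-- ===== Notes on version B (the rewrite author's own statement) =====
-- stated objective: alternative
-- what changed: B scans maximal runs of equal consecutive values (two-pointer, groupby-style) and tests each run's label and length, instead of maintaining and resetting a per-element counter.
import Mathlib
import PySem

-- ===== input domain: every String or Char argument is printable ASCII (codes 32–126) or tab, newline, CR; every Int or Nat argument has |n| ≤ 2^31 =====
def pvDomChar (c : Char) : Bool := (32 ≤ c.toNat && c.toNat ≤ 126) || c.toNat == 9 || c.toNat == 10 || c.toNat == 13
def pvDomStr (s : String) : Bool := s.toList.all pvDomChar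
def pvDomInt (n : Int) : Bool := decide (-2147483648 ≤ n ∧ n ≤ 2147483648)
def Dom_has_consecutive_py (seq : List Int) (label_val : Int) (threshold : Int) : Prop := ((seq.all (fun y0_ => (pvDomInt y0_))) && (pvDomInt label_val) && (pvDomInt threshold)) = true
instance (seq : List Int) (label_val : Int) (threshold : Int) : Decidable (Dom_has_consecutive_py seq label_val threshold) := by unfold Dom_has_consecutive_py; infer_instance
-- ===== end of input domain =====

-- B scans maximal runs of equal consecutive values and tests each run's label and
-- length, instead of A's per-element counter with resets (objective: alternative).

-- ===== PORT A =====
-- counter loop with early return, transliterated as structural recursion on seq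
def hcGoA (label_val threshold : Int) : List Int → Int → Bool
  | [], _ => false
  | label :: rest, count =>
    if label = label_val then
      if count + 1 ≥ threshold then true
      else hcGoA label_val threshold rest (count + 1)
    else hcGoA label_val threshold rest 0

def has_consecutive_py (seq : List Int) (label_val : Int) (threshold : Int) : Bool :=
  hcGoA label_val threshold seq 0

-- ===== PORT B =====
-- inner while loop: length of the maximal run of x at the front of xs, and the remainder
def hcSpan (x : Int) : List Int → Nat × List Int
  | [] => (0, [])
  | y :: ys => if y = x then ((hcSpan x ys).1 + 1, (hcSpan x ys).2) else (0, y :: ys)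

theorem hcSpan_len (x : Int) : ∀ (xs : List Int), (hcSpan x xs).2.length ≤ xs.length := by
  intro xs
  induction xs with
  | nil => simp [hcSpan]
  | cons y ys ih =>
    by_cases h : y = x <;> simp [hcSpan, h] <;> omega

-- outer while loop over runs
def hcGoB (label_val threshold : Int) : List Int → Bool
  | [] => false
  | x :: xs =>
    let s := hcSpan x xs
    if x = label_val ∧ threshold ≤ (s.1 : Int) + 1 then true
    else hcGoB label_val threshold s.2
termination_by xs => xs.length
decreasing_by
  simpa using Nat.lt_succ_of_le (hcSpan_len x xs)

def has_consecutive_py_alt (seq : List Int) (label_val : Int) (threshold : Int) : Bool :=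
  hcGoB label_val threshold seq

-- ===== PRECONDITION & SPEC =====
def Spec_has_consecutive_py (seq : List Int) (label_val : Int) (threshold : Int) (out : Bool) : Prop := out = has_consecutive_py_alt seq label_val threshold
instance (seq : List Int) (label_val : Int) (threshold : Int) (out : Bool) : Decidable (Spec_has_consecutive_py seq label_val threshold out) := by unfold Spec_has_consecutive_py; infer_instance

-- ===== CLAIM (what is proved, stated in full; the proofs are below) =====
def Claim_equal_has_consecutive_py : Prop := ∀ (seq : List Int) (label_val : Int) (threshold : Int), Dom_has_consecutive_py seq label_val threshold → Spec_has_consecutive_py seq label_val threshold (has_consecutive_py seq label_val threshold)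

-- ===== LEMMAS AND PROOFS =====

theorem hcSpan_decomp (x : Int) : ∀ (xs : List Int),
    x :: xs = List.replicate ((hcSpan x xs).1 + 1) x ++ (hcSpan x xs).2 := by
  intro xs
  induction xs with
  | nil => simp [hcSpan]
  | cons y ys ih =>
    by_cases h : y = x
    · subst h
      simp only [hcSpan]
      rw [List.replicate_succ]
      simpa using ih
    · simp [hcSpan, h]

theorem hcSpan_rest_head (x : Int) : ∀ (xs : List Int) (y : Int) (ys : List Int),
    (hcSpan x xs).2 = y :: ys → y ≠ x := by
  intro xs
  induction xs with
  | nil => intro y ys h; simp [hcSpan] at h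
  | cons z zs ih =>
    intro y ys h
    by_cases hz : z = x
    · exact ih y ys (by simpa [hcSpan, hz] using h)
    · simp [hcSpan, hz] at h
      omega

-- A over a run of the target value: early return iff count + run length reaches threshold
theorem hcGoA_run_target (v t : Int) : ∀ (n : Nat) (rest : List Int) (c : Int),
    hcGoA v t (List.replicate n v ++ rest) c =
      if 1 ≤ n ∧ t ≤ c + (n : Int) then true else hcGoA v t rest (c + (n : Int)) := by
  intro n
  induction n with
  | zero => intro rest c; simp
  | succ m ih =>
    intro rest c
    rw [List.replicate_succ, List.cons_append]
    simp only [hcGoA]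
    rw [ih]
    push_cast
    simp only [true_and]
    split_ifs <;> first | rfl | (exfalso; omega) | (congr 1; ring)

-- A over a run of a non-target value: each element resets the counter
theorem hcGoA_run_other (v t x : Int) (hx : x ≠ v) : ∀ (n : Nat) (rest : List Int),
    hcGoA v t (List.replicate n x ++ rest) 0 = hcGoA v t rest 0 := by
  intro n
  induction n with
  | zero => intro rest; simp
  | succ m ih =>
    intro rest
    rw [List.replicate_succ, List.cons_append]
    simp only [hcGoA, if_neg hx]
    exact ih rest

-- after a run, if the remainder starts with a non-target value (or is empty),
-- the counter value does not matter
theorem hcGoA_reset (v t : Int) (rest : List Int)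
    (h : ∀ y ys, rest = y :: ys → y ≠ v) (c : Int) :
    hcGoA v t rest c = hcGoA v t rest 0 := by
  cases rest with
  | nil => rfl
  | cons y ys =>
    have hy : y ≠ v := h y ys rfl
    simp [hcGoA, hy]

theorem hcGo_eq (v t : Int) : ∀ (N : Nat) (seq : List Int), seq.length ≤ N →
    hcGoA v t seq 0 = hcGoB v t seq := by
  intro N
  induction N with
  | zero =>
    intro seq h
    have hnil : seq = [] := List.eq_nil_of_length_eq_zero (Nat.le_zero.mp h)
    subst hnil
    simp [hcGoA, hcGoB]
  | succ M ih =>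
    intro seq hlen
    cases seq with
    | nil => simp [hcGoA, hcGoB]
    | cons x xs =>
      have hdecomp := hcSpan_decomp x xs
      have hrest : (hcSpan x xs).2.length ≤ M := by
        have := hcSpan_len x xs
        simp at hlen
        omega
      have hB : hcGoB v t (x :: xs) =
          if x = v ∧ t ≤ ((hcSpan x xs).1 : Int) + 1 then true
          else hcGoB v t (hcSpan x xs).2 := by
        rw [hcGoB]
      rw [hB]
      by_cases hx : x = v
      · subst hx
        conv_lhs => rw [hdecomp]
        rw [hcGoA_run_target]
        by_cases hc : t ≤ ((hcSpan x xs).1 : Int) + 1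
        · rw [if_pos ⟨by omega, by push_cast; omega⟩, if_pos ⟨rfl, hc⟩]
        · rw [if_neg (by push_cast; omega), if_neg (fun h => hc h.2),
            hcGoA_reset x t _ (hcSpan_rest_head x xs)]
          exact ih _ hrest
      · conv_lhs => rw [hdecomp]
        rw [hcGoA_run_other v t x hx, if_neg (fun h => hx h.1)]
        exact ih _ hrest

-- ===== VERDICT (by name: the statement is the Claim_ definition above) =====
theorem has_consecutive_py_spec : Claim_equal_has_consecutive_py := by
  intro seq label_val threshold _
  unfold Spec_has_consecutive_py has_consecutive_py has_consecutive_py_alt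
  exact hcGo_eq label_val threshold seq.length seq le_rfl
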